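-- pv_equiv track=rewrite | github.com/chamip/languageLearn | python/tsy/func.py | calfibo
-- ===== SOURCE A (Python) =====
-- def calfibo(n: int) -> int:
--     res = 0
--     a, b = 0, 1
--     while b <= n:
--         res += b
--         tmp = b
--         b += a
--         a = tmp
--     return res
-- ===== SOURCE B (Python) =====
-- def fib(k: int) -> int:
--     # k-th Fibonacci number (fib(0)=0, fib(1)=1), computed from scratch
--     x, y = 0, 1
--     for _ in range(k):
--         x, y = y, x + y
--     return x
--
--
-- def calfibo(n: int) -> int:
--     # No accumulator and no running pair across the answer: find the first
--     # index k whose Fibonacci number exceeds n, then use the closed-form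
--     # identity  fib(1)+...+fib(k-1) = fib(k+1) - 1.
--     k = 1
--     while fib(k) <= n:
--         k += 1
--     return fib(k + 1) - 1
-- ===== Notes on version B (the rewrite author's own statement) =====
-- stated objective: alternative
-- what changed: B keeps no running sum and no pair across the search: it searches for the first index k whose Fibonacci number (recomputed from scratch by an index-based helper) exceeds n, then returns the closed-form fib(k+1)-1.
import Mathlib
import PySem

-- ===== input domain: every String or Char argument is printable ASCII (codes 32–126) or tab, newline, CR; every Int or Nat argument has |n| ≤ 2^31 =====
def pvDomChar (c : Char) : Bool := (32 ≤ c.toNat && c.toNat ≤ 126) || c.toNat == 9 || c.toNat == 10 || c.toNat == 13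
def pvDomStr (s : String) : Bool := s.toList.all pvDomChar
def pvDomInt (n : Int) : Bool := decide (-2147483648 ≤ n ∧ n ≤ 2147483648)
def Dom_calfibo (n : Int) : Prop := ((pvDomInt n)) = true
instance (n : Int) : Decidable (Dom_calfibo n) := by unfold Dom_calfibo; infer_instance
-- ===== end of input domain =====

-- B replaces the accumulating loop by an index search: find the first index k with
-- fib(k) > n (fib recomputed from scratch per index) and return fib(k+1) - 1.

-- ===== PORT A =====
-- A's while loop; the invariant hypotheses serve only to prove termination.
def calfiboLoopA (n res a b : Int) (ha : 0 ≤ a) (hb : 1 ≤ b) (hab : a ≤ b) : Int :=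
  if h : b ≤ n then
    calfiboLoopA n (res + b) b (a + b) (by omega) (by omega) (by omega)
  else
    res
termination_by (2 * n + 2 - (a + b)).toNat
decreasing_by omega

def calfibo (n : Int) : Int :=
  calfiboLoopA n 0 0 1 (by omega) (by omega) (by omega)

-- ===== PORT B =====
-- B's helper fib(k): for _ in range(k): x, y = y, x + y; return x
def calfiboFib (k : Int) : Int :=
  ((List.range k.toNat).foldl (fun (p : Int × Int) _ => (p.2, p.1 + p.2)) (0, 1)).1

-- termination lemma for B's search loop (cited in its decreasing_by): fib(k) ≥ k - 1
theorem calfiboFib_ge (k : Int) : k - 1 ≤ calfiboFib k := by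
  by_cases hk : k ≤ 0
  · have : k.toNat = 0 := by omega
    simp [calfiboFib, this]; omega
  · push_neg at hk
    have hinv : ∀ m : Nat,
        (let p := (List.range m).foldl (fun (p : Int × Int) _ => (p.2, p.1 + p.2)) (0, 1)
         0 ≤ p.1 ∧ 1 ≤ p.2 ∧ (m : Int) - 1 ≤ p.1 ∧ (m : Int) ≤ p.2 ∧ (m : Int) + 1 ≤ p.1 + p.2) := by
      intro m
      induction m with
      | zero => simp
      | succ m ih =>
        simp only [List.range_succ, List.foldl_append, List.foldl_cons, List.foldl_nil] at *
        push_cast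
        omega
    have := hinv k.toNat
    simp only [calfiboFib]
    have hcast : ((k.toNat : Int)) = k := by omega
    rw [hcast] at this
    omega

-- B's search loop: k = 1; while fib(k) <= n: k += 1; return k
def calfiboLoopB (n k : Int) (hk : 1 ≤ k) : Int :=
  if h : calfiboFib k ≤ n then
    calfiboLoopB n (k + 1) (by omega)
  else
    k
termination_by (n + 2 - k).toNat
decreasing_by
  have := calfiboFib_ge k
  omega

def calfibo_alt (n : Int) : Int :=
  calfiboFib (calfiboLoopB n 1 (by omega) + 1) - 1

-- ===== PRECONDITION & SPEC =====
def Spec_calfibo (n : Int) (out : Int) : Prop := out = calfibo_alt n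
instance (n : Int) (out : Int) : Decidable (Spec_calfibo n out) := by unfold Spec_calfibo; infer_instance

-- ===== CLAIM (what is proved, stated in full; the proofs are below) =====
def Claim_equal_calfibo : Prop := ∀ (n : Int), Dom_calfibo n → Spec_calfibo n (calfibo n)

-- ===== LEMMAS AND PROOFS =====

-- the Fibonacci pair after m steps (proof-side view of B's helper)
def fibP (m : Nat) : Int × Int :=
  (List.range m).foldl (fun (p : Int × Int) _ => (p.2, p.1 + p.2)) (0, 1)

theorem fibP_succ (m : Nat) : fibP (m + 1) = ((fibP m).2, (fibP m).1 + (fibP m).2) := by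
  simp [fibP, List.range_succ]

theorem calfiboFib_eq_fibP (m : Nat) : calfiboFib (m : Int) = (fibP m).1 := by
  simp [calfiboFib, fibP]

-- A's loop, started at the Fibonacci pair of index m, equals B's closed form.
theorem loopA_eq (n res a b : Int) (ha : 0 ≤ a) (hb : 1 ≤ b) (hab : a ≤ b) :
    ∀ m : Nat, fibP m = (a, b) →
      calfiboLoopA n res a b ha hb hab =
        res + calfiboFib (calfiboLoopB n ((m : Int) + 1) (by omega) + 1) - a - b := by
  fun_induction calfiboLoopA n res a b ha hb hab with
  | case1 res a b ha hb hab h ih =>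
    intro m hm
    have hstep : fibP (m + 1) = (b, a + b) := by rw [fibP_succ, hm]
    have hfib : calfiboFib ((m : Int) + 1) = b := by
      have := calfiboFib_eq_fibP (m + 1)
      push_cast at this
      rw [hstep] at this
      exact this
    rw [calfiboLoopB, dif_pos (by rw [hfib]; exact h)]
    have := ih (m + 1) hstep
    push_cast at this ⊢
    rw [this]
    ring
  | case2 res a b ha hb hab h =>
    intro m hm
    have hstep : fibP (m + 1) = (b, a + b) := by rw [fibP_succ, hm]
    have hfib : calfiboFib ((m : Int) + 1) = b := by
      have := calfiboFib_eq_fibP (m + 1)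
      push_cast at this
      rw [hstep] at this
      exact this
    have hfib2 : calfiboFib ((m : Int) + 2) = a + b := by
      have := calfiboFib_eq_fibP (m + 2)
      push_cast at this
      rw [fibP_succ, hstep] at this
      exact this
    rw [calfiboLoopB, dif_neg (by rw [hfib]; exact h)]
    rw [show (m : Int) + 1 + 1 = (m : Int) + 2 by ring, hfib2]
    ring

-- ===== VERDICT (by name: the statement is the Claim_ definition above) =====
theorem calfibo_spec : Claim_equal_calfibo := by
  intro n _
  unfold Spec_calfibo calfibo calfibo_alt
  have := loopA_eq n 0 0 1 (by omega) (by omega) (by omega) 0 (by simp [fibP])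
  simp only [Nat.cast_zero, zero_add] at this
  rw [this]
  ring
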